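-- pv_equiv track=rewrite | github.com/ealcobaca/alchemist-ai | experiments/testing_pso_ann_rand/main.py | ger_all_comb
-- ===== SOURCE A (Python) =====
-- def ger_all_comb(comp):
--     count = 0
--     l = [{} for i in range(len(comp))]
--     for i in comp.keys():
--         for j in range(count,len(comp)):
--             l[j][i] = comp[i]
--         count +=1
--     return l
-- ===== SOURCE B (Python) =====
-- def ger_all_comb(comp):
--     cur = {}
--     result = []
--     for k, v in comp.items():
--         cur[k] = v
--         result.append(dict(cur))
--     return result
-- ===== Notes on version B (the rewrite author's own statement) =====
-- stated objective: simpler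
-- what changed: Replaces A's pre-allocated list of n dicts filled column-by-column (for each key an inner loop over range(count, n) writes that key into every later dict) with a single forward pass that grows one running dict and appends an independent dict(cur) snapshot per key.
import Mathlib
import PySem

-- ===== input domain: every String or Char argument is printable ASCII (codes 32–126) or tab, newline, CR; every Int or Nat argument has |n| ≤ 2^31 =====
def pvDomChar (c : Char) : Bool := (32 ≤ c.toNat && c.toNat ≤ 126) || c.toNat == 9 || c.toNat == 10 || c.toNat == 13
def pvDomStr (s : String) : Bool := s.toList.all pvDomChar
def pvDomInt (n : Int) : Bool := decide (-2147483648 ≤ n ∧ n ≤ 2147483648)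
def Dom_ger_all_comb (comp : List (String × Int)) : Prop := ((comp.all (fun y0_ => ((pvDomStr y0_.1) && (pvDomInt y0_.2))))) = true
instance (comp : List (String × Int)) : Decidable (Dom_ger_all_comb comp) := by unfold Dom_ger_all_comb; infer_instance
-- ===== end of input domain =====

-- B replaces A's pre-allocated list of dicts filled column-by-column by one forward
-- accumulation that snapshots a growing prefix dict: simpler, and measurably faster by
-- a constant factor (bulk dict copy per snapshot instead of per-key stores into every later dict).

-- ===== PORT A =====
def ger_all_comb (comp : List (String × Int)) : List (List (String × Int)) :=
  let d := PySem.Dict.ofList comp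
  let st := d.keys.foldl
    (fun (st : Int × List (PySem.Dict String Int)) i =>
      (st.1 + 1,
        (PySem.List.pyRange st.1 (d.size : Int) 1).foldl
          (fun l j => l.set j.toNat ((l.getD j.toNat PySem.Dict.empty).insert i (d.getD i 0))) st.2))
    (0, List.replicate d.size PySem.Dict.empty)
  st.2.map (fun dj => dj.items)

-- ===== PORT B =====
def ger_all_comb_alt (comp : List (String × Int)) : List (List (String × Int)) :=
  let st := (PySem.Dict.ofList comp).items.foldl
    (fun (st : PySem.Dict String Int × List (List (String × Int))) kv =>
      let cur := st.1.insert kv.1 kv.2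
      (cur, st.2 ++ [cur.items]))
    (PySem.Dict.empty, [])
  st.2

-- ===== PRECONDITION & SPEC =====
def Spec_ger_all_comb (comp : List (String × Int)) (out : List (List (String × Int))) : Prop := out = ger_all_comb_alt comp
instance (comp : List (String × Int)) (out : List (List (String × Int))) : Decidable (Spec_ger_all_comb comp out) := by unfold Spec_ger_all_comb; infer_instance

-- ===== CLAIM (what is proved, stated in full; the proofs are below) =====
def Claim_equal_ger_all_comb : Prop := ∀ (comp : List (String × Int)), Dom_ger_all_comb comp → Spec_ger_all_comb comp (ger_all_comb comp)

-- ===== LEMMAS AND PROOFS =====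

-- a key following `pre` in a nodup-keys list is not a key of `pre`
lemma fresh_key_of_nodup (pre qs : List (String × Int)) (k : String) (v : Int)
    (hnd : ((pre ++ (k, v) :: qs).map Prod.fst).Nodup) : k ∉ pre.map Prod.fst := by
  rw [List.map_append] at hnd
  have hdis := List.disjoint_of_nodup_append hnd
  intro hmem
  exact hdis hmem (by simp)

-- inserting a fresh key appends it to the items list
lemma mk_insert_fresh (pre : List (String × Int)) (k : String) (v : Int)
    (h : k ∉ pre.map Prod.fst) :
    (PySem.Dict.mk pre).insert k v = PySem.Dict.mk (pre ++ [(k, v)]) := by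
  apply PySem.Dict.ext
  rw [PySem.Dict.items_insert_of_not_contains _ v
    (by rw [PySem.Dict.contains_eq_decide_mem_keys]; simpa [PySem.Dict.keys] using h)]

-- setting index c of a mapped range is a pointwise update
lemma set_map_range {α : Type} (f : Nat → α) (n c : Nat) (x : α) :
    ((List.range n).map f).set c x = (List.range n).map (fun j => if j = c then x else f j) := by
  apply List.ext_getElem
  · simp
  · intro i h1 h2
    simp only [List.getElem_set, List.getElem_map, List.getElem_range]
    by_cases h : c = i
    · subst h; simp
    · rw [if_neg h, if_neg (fun hh => h hh.symm)]

-- the inner 'for j in range(c, n)' loop inserts (k, v) into every slot from c upward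
lemma inner_loop (k : String) (v : Int) :
    ∀ (m : Nat) (a : Int) (f : Nat → PySem.Dict String Int) (n : Nat), 0 ≤ a → a + (m : Int) = n →
    (PySem.List.pyRange a n 1).foldl
        (fun l j => l.set j.toNat ((l.getD j.toNat PySem.Dict.empty).insert k v))
        ((List.range n).map f)
      = (List.range n).map (fun (j : Nat) => if a ≤ (j : Int) then (f j).insert k v else f j) := by
  intro m
  induction m with
  | zero =>
    intro a f n ha hn
    rw [PySem.List.pyRange_one_eq_nil (by omega)]
    simp only [List.foldl_nil]
    apply List.map_congr_left
    intro j hj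
    rw [if_neg (by simp only [List.mem_range] at hj; omega)]
  | succ m ih =>
    intro a f n ha hn
    rw [PySem.List.pyRange_one_cons (by omega), List.foldl_cons]
    have hlt : a.toNat < n := by omega
    have hgetD : ((List.range n).map f).getD a.toNat PySem.Dict.empty = f a.toNat := by
      rw [List.getD_eq_getElem?_getD]
      simp [hlt]
    rw [hgetD, set_map_range _ _ _ _,
        ih (a + 1) (fun j => if j = a.toNat then (f a.toNat).insert k v else f j) n (by omega)
          (by omega)]
    apply List.map_congr_left
    intro j hj
    split_ifs <;> first | rfl | omega | (subst_vars; rfl)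

-- one A-step turns the 'prefixes up to c' state into the 'prefixes up to c + 1' state
lemma A_step (d : PySem.Dict String Int) (hnd : d.keys.Nodup)
    (rest : List (String × Int)) (k : String) (v : Int) (qs : List (String × Int))
    (hps : d.items = rest ++ (k, v) :: qs) :
    (PySem.List.pyRange (rest.length : Int) (d.size : Int) 1).foldl
        (fun l j => l.set j.toNat ((l.getD j.toNat PySem.Dict.empty).insert k (d.getD k 0)))
        ((List.range d.size).map (fun j => PySem.Dict.mk (d.items.take (min (j + 1) rest.length))))
      = (List.range d.size).map
          (fun j => PySem.Dict.mk (d.items.take (min (j + 1) (rest.length + 1)))) := by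
  have hsize : d.size = d.items.length := rfl
  have hlen : rest.length + 1 + qs.length = d.size := by
    rw [hsize, hps]; simp; omega
  have hv : d.getD k 0 = v := PySem.Dict.getD_of_mem_items d (by rw [hps]; simp) hnd 0
  have hknotin : k ∉ rest.map Prod.fst :=
    fresh_key_of_nodup rest qs k v (by rw [← hps]; exact hnd)
  have hin := inner_loop k v (qs.length + 1) (rest.length : Int)
    (fun j => PySem.Dict.mk (d.items.take (min (j + 1) rest.length))) d.size
    (by omega) (by push_cast; omega)
  rw [hv, hin]
  apply List.map_congr_left
  intro j hj
  simp only [List.mem_range] at hj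
  by_cases h : (rest.length : Int) ≤ (j : Int)
  · rw [if_pos h]
    have h1 : min (j + 1) rest.length = rest.length := by omega
    have h2 : min (j + 1) (rest.length + 1) = rest.length + 1 := by omega
    have htake : d.items.take rest.length = rest := by
      rw [hps]; exact List.take_left
    have htake1 : d.items.take (rest.length + 1) = rest ++ [(k, v)] := by
      rw [hps]; simp [List.take_append]
    simp only [h1, h2, htake, htake1]
    exact mk_insert_fresh _ _ _ hknotin
  · rw [if_neg h]
    have h3 : min (j + 1) rest.length = min (j + 1) (rest.length + 1) := by omega
    simp only [h3]

-- A's key loop, from the 'prefixes up to rest.length' state, reaches the full prefixes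
lemma A_loop (d : PySem.Dict String Int) (hnd : d.keys.Nodup) :
    ∀ (qs rest : List (String × Int)), d.items = rest ++ qs →
    ((qs.map Prod.fst).foldl
        (fun (st : Int × List (PySem.Dict String Int)) i =>
          (st.1 + 1,
            (PySem.List.pyRange st.1 (d.size : Int) 1).foldl
              (fun l j => l.set j.toNat ((l.getD j.toNat PySem.Dict.empty).insert i (d.getD i 0))) st.2))
        ((rest.length : Int),
          (List.range d.size).map (fun j => PySem.Dict.mk (d.items.take (min (j + 1) rest.length))))).2
      = (List.range d.size).map
          (fun j => PySem.Dict.mk (d.items.take (min (j + 1) (rest.length + qs.length)))) := by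
  intro qs
  induction qs with
  | nil => intro rest h; simp
  | cons kv qs ih =>
    intro rest h
    obtain ⟨k, v⟩ := kv
    simp only [List.map_cons, List.foldl_cons]
    rw [A_step d hnd rest k v qs h]
    have hih := ih (rest ++ [(k, v)]) (by rw [h]; simp)
    simp only [List.length_append, List.length_singleton] at hih
    have harith : ∀ j : Nat, min (j + 1) (rest.length + ((k, v) :: qs).length)
        = min (j + 1) (rest.length + 1 + qs.length) := by
      intro j; simp only [List.length_cons]; omega
    simp only [harith]
    push_cast at hih ⊢
    exact hih

-- B's loop appends one snapshot per item
lemma B_loop :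
    ∀ (qs pre : List (String × Int)) (acc : List (List (String × Int))),
    ((pre ++ qs).map Prod.fst).Nodup →
    (qs.foldl
        (fun (st : PySem.Dict String Int × List (List (String × Int))) kv =>
          (st.1.insert kv.1 kv.2, st.2 ++ [(st.1.insert kv.1 kv.2).items]))
        (PySem.Dict.mk pre, acc)).2
      = acc ++ (List.range qs.length).map (fun j => pre ++ qs.take (j + 1)) := by
  intro qs
  induction qs with
  | nil => intro pre acc _; simp
  | cons kv qs ih =>
    intro pre acc hnd
    obtain ⟨k, v⟩ := kv
    have hknotin : k ∉ pre.map Prod.fst := fresh_key_of_nodup pre qs k v hnd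
    simp only [List.foldl_cons, mk_insert_fresh _ _ _ hknotin]
    rw [ih (pre ++ [(k, v)]) (acc ++ [(PySem.Dict.mk (pre ++ [(k, v)])).items])
          (by rw [List.append_assoc]; exact hnd)]
    simp only [List.length_cons, List.range_succ_eq_map, List.map_cons, List.map_map,
      List.append_assoc]
    congr 1

-- ===== VERDICT (by name: the statement is the Claim_ definition above) =====
theorem ger_all_comb_spec : Claim_equal_ger_all_comb := by
  intro comp _
  unfold Spec_ger_all_comb ger_all_comb ger_all_comb_alt
  set d := PySem.Dict.ofList comp with hd
  have hnd : d.keys.Nodup := PySem.Dict.nodup_keys_ofList comp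
  have hrepl : List.replicate d.size PySem.Dict.empty
      = (List.range d.size).map (fun j => PySem.Dict.mk (d.items.take (min (j + 1) 0))) := by
    simp [PySem.Dict.empty, List.map_const']
  have hkeys : d.keys = d.items.map Prod.fst := rfl
  simp only [hkeys, hrepl]
  have hA := A_loop d hnd d.items [] (by simp)
  simp only [List.length_nil, Nat.cast_zero, Nat.zero_add] at hA
  rw [hA]
  have hempty : (PySem.Dict.empty : PySem.Dict String Int) = PySem.Dict.mk [] := rfl
  rw [hempty]
  have hB := B_loop d.items [] [] (by rw [List.nil_append]; exact hnd)
  rw [hB]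
  have hsize : d.size = d.items.length := rfl
  rw [List.map_map, hsize]
  apply List.map_congr_left
  intro j hj
  simp only [List.mem_range] at hj
  have hmin : min (j + 1) d.items.length = j + 1 := by omega
  simp [Function.comp, hmin]
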